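-- pv_equiv track=rewrite | github.com/jpneto/Images | sagme/2025_05_challenge_polylines.py | is_non_coincidental
-- ===== SOURCE A (Python) =====
-- def is_non_coincidental(polyline):
--   """ check if any pair of lines don't overlap """
--   d = 1j # all polylines start at 0 going north
--   seen = { (0, cur:=0+d) }
--
--   for p in polyline:
--     if p == 'R': d *= -1j
--     if p == 'L': d *=  1j
--     if (cur, cur+d) in seen or (cur+d, cur) in seen:
--       return False
--     seen.add( (cur, cur+d) )
--     cur += d
--   return True
-- ===== SOURCE B (Python) =====
-- def is_non_coincidental(polyline):
--   """ check if any pair of lines don't overlap """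
--   # Stage 1: walk with a heading index into a delta table, turning each unit
--   # segment into a single integer code (orientation-independent: the smaller
--   # of the two directed base-m encodings; coordinates stay below m/2 so the
--   # encoding is injective).  Stage 2: sort the codes and scan neighbours.
--   DX = [0, 1, 0, -1]
--   DY = [1, 0, -1, 0]
--   m = 2 * len(polyline) + 5
--
--   def code(x1, y1, x2, y2):
--     a = ((x1 * m + y1) * m + x2) * m + y2
--     b = ((x2 * m + y2) * m + x1) * m + y1
--     return a if a < b else b
--
--   h, x, y = 0, 0, 1
--   codes = [code(0, 0, 0, 1)]
--   for p in polyline: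
--     if p == 'R': h = (h + 1) % 4
--     elif p == 'L': h = (h - 1) % 4
--     nx, ny = x + DX[h], y + DY[h]
--     codes.append(code(x, y, nx, ny))
--     x, y = nx, ny
--   codes.sort()
--   return all(c1 != c2 for c1, c2 in zip(codes, codes[1:]))
-- ===== Notes on version B (the rewrite author's own statement) =====
-- stated objective: alternative
-- what changed: B replaces A's fused scan (incremental seen-set of directed complex-number pairs, two-orientation membership test, early return) by a staged pipeline: a table-driven heading-index walk that maps every unit segment to one integer via an injective orientation-independent base-m encoding, then an integer sort and an adjacent-neighbour scan for duplicates; pure-int arithmetic replaces complex numbers and tuple hashing.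
import Mathlib
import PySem

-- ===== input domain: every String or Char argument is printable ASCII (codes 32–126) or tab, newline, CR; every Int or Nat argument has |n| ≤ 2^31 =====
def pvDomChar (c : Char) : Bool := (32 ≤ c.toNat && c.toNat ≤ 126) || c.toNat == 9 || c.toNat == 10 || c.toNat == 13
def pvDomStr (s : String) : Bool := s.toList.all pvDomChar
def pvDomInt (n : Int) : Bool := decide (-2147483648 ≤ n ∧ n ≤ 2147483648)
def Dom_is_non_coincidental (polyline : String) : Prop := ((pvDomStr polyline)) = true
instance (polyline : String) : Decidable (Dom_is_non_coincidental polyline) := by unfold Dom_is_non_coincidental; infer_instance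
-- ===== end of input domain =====

-- B replaces A's fused scan (incremental seen-set, two-orientation membership test, early
-- return) by a staged pipeline: a table-driven heading-index walk mapping each unit segment
-- to one integer via an injective orientation-independent base-m encoding, then an integer
-- sort and an adjacent-neighbour scan for duplicates; objective: alternative, same behaviour.

-- ===== PORT A =====
-- complex numbers with integer components modelled as (re, im) pairs
def pvAdd (a b : Int × Int) : Int × Int := (a.1 + b.1, a.2 + b.2)
-- d * -1j  and  d * 1j
def pvRotR (d : Int × Int) : Int × Int := (d.2, -d.1)
def pvRotL (d : Int × Int) : Int × Int := (-d.2, d.1)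

def pvLoopA : List Char → (Int × Int) → (Int × Int) → PySem.Set ((Int × Int) × (Int × Int)) → Bool
  | [], _, _, _ => true
  | p :: ps, d, cur, seen =>
    let d1 := if p = 'R' then pvRotR d else d
    let d2 := if p = 'L' then pvRotL d1 else d1
    if PySem.Set.contains seen (cur, pvAdd cur d2) || PySem.Set.contains seen (pvAdd cur d2, cur)
    then false
    else pvLoopA ps d2 (pvAdd cur d2) (PySem.Set.add seen (cur, pvAdd cur d2))

def is_non_coincidental (polyline : String) : Bool :=
  pvLoopA polyline.toList (0, 1) (0, 1) (PySem.Set.ofList [((0, 0), (0, 1))])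

-- ===== PORT B =====
-- code(x1,y1,x2,y2): the smaller of the two directed base-m encodings of a segment
def pvEnc (m x1 y1 x2 y2 : Int) : Int := ((x1 * m + y1) * m + x2) * m + y2
def pvCode (m x1 y1 x2 y2 : Int) : Int :=
  let a := pvEnc m x1 y1 x2 y2
  let b := pvEnc m x2 y2 x1 y1
  if a < b then a else b

-- (DX[h], DY[h]) of Source B; exact for the h ∈ {0,1,2,3} the loop maintains
def pvDelta (h : Int) : Int × Int :=
  if h = 0 then (0, 1) else if h = 1 then (1, 0) else if h = 2 then (0, -1) else (-1, 0)

-- the loop of Source B: heading index h, position (x, y), emitting one code per char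
def pvCodes (m : Int) : List Char → Int → (Int × Int) → List Int
  | [], _, _ => []
  | p :: ps, h, cur =>
    let h' := if p = 'R' then PySem.Int.mod (h + 1) 4
              else if p = 'L' then PySem.Int.mod (h - 1) 4 else h
    let d := pvDelta h'
    let nxt := (cur.1 + d.1, cur.2 + d.2)
    pvCode m cur.1 cur.2 nxt.1 nxt.2 :: pvCodes m ps h' nxt

-- all(c1 != c2 for c1, c2 in zip(codes, codes[1:]))
def pvAllAdjNe : List Int → Bool
  | a :: b :: t => (a != b) && pvAllAdjNe (b :: t)
  | _ => true

def is_non_coincidental_alt (polyline : String) : Bool :=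
  let m : Int := 2 * (polyline.toList.length : Int) + 5   -- m = 2*len(polyline) + 5
  let codes := pvCode m 0 0 0 1 :: pvCodes m polyline.toList 0 (0, 1)
  pvAllAdjNe (PySem.List.sorted codes (fun x => x) false)

-- ===== PRECONDITION & SPEC =====
def Spec_is_non_coincidental (polyline : String) (out : Bool) : Prop := out = is_non_coincidental_alt polyline
instance (polyline : String) (out : Bool) : Decidable (Spec_is_non_coincidental polyline out) := by unfold Spec_is_non_coincidental; infer_instance

-- ===== CLAIM (what is proved, stated in full; the proofs are below) =====
def Claim_equal_is_non_coincidental : Prop := ∀ (polyline : String), Dom_is_non_coincidental polyline → Spec_is_non_coincidental polyline (is_non_coincidental polyline)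

-- ===== LEMMAS AND PROOFS =====

-- canonical (lex-smaller endpoint first) form of a segment, and the list of canonical
-- segments the walk traverses: the common reference both ports are compared against
def pvCanon (a b : Int × Int) : (Int × Int) × (Int × Int) :=
  if a.1 < b.1 ∨ (a.1 = b.1 ∧ a.2 ≤ b.2) then (a, b) else (b, a)

def pvCEdges : List Char → (Int × Int) → (Int × Int) → List ((Int × Int) × (Int × Int))
  | [], _, _ => []
  | p :: ps, d, cur =>
    let d' := if p = 'R' then (d.2, -d.1) else if p = 'L' then (-d.2, d.1) else d
    let nxt := (cur.1 + d'.1, cur.2 + d'.2)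
    pvCanon cur nxt :: pvCEdges ps d' nxt

theorem pvCanon_eq_iff (a b c d : Int × Int) (hab : a ≠ b) (hcd : c ≠ d) :
    pvCanon a b = pvCanon c d ↔ ((a, b) = (c, d) ∨ (b, a) = (c, d)) := by
  obtain ⟨a1, a2⟩ := a; obtain ⟨b1, b2⟩ := b; obtain ⟨c1, c2⟩ := c; obtain ⟨d1, d2⟩ := d
  simp only [pvCanon, Prod.mk.injEq, ne_eq, not_and] at *
  split_ifs <;> simp only [Prod.mk.injEq] <;> omega

-- ---- A-side: the fused scan succeeds iff the (L ++ remaining canonical edges) list is duplicate-free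
theorem pvLoopA_eq_nodup :
    ∀ (cs : List Char) (d cur : Int × Int) (seen : PySem.Set ((Int × Int) × (Int × Int)))
      (L : List ((Int × Int) × (Int × Int))),
      d ≠ (0, 0) → L.Nodup →
      (∀ a b : Int × Int, a ≠ b → (((a, b) ∈ seen ∨ (b, a) ∈ seen) ↔ pvCanon a b ∈ L)) →
      (pvLoopA cs d cur seen = true ↔ (L ++ pvCEdges cs d cur).Nodup) := by
  intro cs
  induction cs with
  | nil => intro d cur seen L _ hL _; simp [pvLoopA, pvCEdges, hL]
  | cons p ps ih =>
    intro d cur seen L hd hL hS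
    have hd2 : (if p = 'L' then pvRotL (if p = 'R' then pvRotR d else d)
        else (if p = 'R' then pvRotR d else d)) ≠ (0, 0) := by
      obtain ⟨dx, dy⟩ := d
      simp only [pvRotR, pvRotL, ne_eq, Prod.mk.injEq, not_and] at *
      split_ifs <;> simp only [Prod.mk.injEq] <;> omega
    set d2 := if p = 'L' then pvRotL (if p = 'R' then pvRotR d else d)
        else (if p = 'R' then pvRotR d else d) with hd2def
    have hne : cur ≠ pvAdd cur d2 := by
      obtain ⟨cx, cy⟩ := cur; obtain ⟨ex, ey⟩ := d2
      simp only [pvAdd, ne_eq, Prod.mk.injEq, not_and] at *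
      omega
    have hmem : (PySem.Set.contains seen (cur, pvAdd cur d2)
        || PySem.Set.contains seen (pvAdd cur d2, cur)) = true
        ↔ pvCanon cur (pvAdd cur d2) ∈ L := by
      rw [Bool.or_eq_true, PySem.Set.contains_iff, PySem.Set.contains_iff]
      exact hS cur (pvAdd cur d2) hne
    have hedges : pvCEdges (p :: ps) d cur
        = pvCanon cur (pvAdd cur d2) :: pvCEdges ps d2 (pvAdd cur d2) := by
      by_cases hR : p = 'R'
      · subst hR
        simp [pvCEdges, pvAdd, pvRotR, hd2def]
      · by_cases hl : p = 'L'
        · subst hl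
          simp [pvCEdges, pvAdd, pvRotL, hd2def]
        · simp [pvCEdges, pvAdd, hd2def, hR, hl]
    have hloop : pvLoopA (p :: ps) d cur seen
        = if (PySem.Set.contains seen (cur, pvAdd cur d2)
            || PySem.Set.contains seen (pvAdd cur d2, cur)) = true
          then false
          else pvLoopA ps d2 (pvAdd cur d2) (PySem.Set.add seen (cur, pvAdd cur d2)) := by
      simp only [pvLoopA]
      rw [← hd2def]
    rw [hloop, hedges]
    by_cases hin : pvCanon cur (pvAdd cur d2) ∈ L
    · rw [if_pos (hmem.mpr hin)]
      constructor
      · intro h; exact absurd h (by simp)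
      · intro h
        exact absurd (by simp) (List.disjoint_of_nodup_append h hin)
    · rw [if_neg (by rw [hmem]; exact hin)]
      have hL' : (L ++ [pvCanon cur (pvAdd cur d2)]).Nodup := by
        refine List.Nodup.append hL (List.nodup_singleton _) ?_
        intro a ha hb
        rw [List.mem_singleton] at hb
        exact hin (hb ▸ ha)
      have hS' : ∀ a b : Int × Int, a ≠ b →
          (((a, b) ∈ PySem.Set.add seen (cur, pvAdd cur d2)
            ∨ (b, a) ∈ PySem.Set.add seen (cur, pvAdd cur d2))
            ↔ pvCanon a b ∈ L ++ [pvCanon cur (pvAdd cur d2)]) := by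
        intro a b hab
        rw [PySem.Set.mem_add, PySem.Set.mem_add, List.mem_append, List.mem_singleton,
          pvCanon_eq_iff a b cur (pvAdd cur d2) hab hne, ← hS a b hab]
        tauto
      rw [ih d2 (pvAdd cur d2) _ _ hd2 hL' hS', ← List.append_cons]

-- the starting set {((0,0),(0,1))} corresponds to the seeded canonical edge list
theorem pvSeed :
    ∀ a b : Int × Int, a ≠ b →
      (((a, b) ∈ PySem.Set.ofList [(((0 : Int), (0 : Int)), ((0 : Int), (1 : Int)))]
        ∨ (b, a) ∈ PySem.Set.ofList [(((0 : Int), (0 : Int)), ((0 : Int), (1 : Int)))])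
        ↔ pvCanon a b ∈ [(((0 : Int), (0 : Int)), ((0 : Int), (1 : Int)))]) := by
  intro a b hab
  have h01 : ((0 : Int), (0 : Int)) ≠ ((0 : Int), (1 : Int)) := by decide
  have : pvCanon ((0 : Int), (0 : Int)) ((0 : Int), (1 : Int))
      = (((0 : Int), (0 : Int)), ((0 : Int), (1 : Int))) := by decide
  simp only [PySem.Set.ofList, List.mem_cons, List.not_mem_nil, or_false]
  rw [← this, pvCanon_eq_iff a b _ _ hab h01, this]
  simp [PySem.Set.empty, PySem.Set.add, PySem.Set.contains]

-- ---- B-side stage 1: the emitted code list is the canonical edge list mapped through pvCode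
def pvCodeOf (m : Int) (e : (Int × Int) × (Int × Int)) : Int :=
  pvCode m e.1.1 e.1.2 e.2.1 e.2.2

theorem pvCode_swap (m x1 y1 x2 y2 : Int) :
    pvCode m x2 y2 x1 y1 = pvCode m x1 y1 x2 y2 := by
  simp only [pvCode]
  split_ifs <;> omega

theorem pvCodeOf_canon (m : Int) (a b : Int × Int) :
    pvCodeOf m (pvCanon a b) = pvCode m a.1 a.2 b.1 b.2 := by
  simp only [pvCanon]
  split_ifs with h
  · rfl
  · exact pvCode_swap m a.1 a.2 b.1 b.2

theorem pvCodes_eq_map (m : Int) :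
    ∀ (cs : List Char) (h : Int) (cur : Int × Int), 0 ≤ h → h < 4 →
      pvCodes m cs h cur = (pvCEdges cs (pvDelta h) cur).map (pvCodeOf m) := by
  intro cs
  induction cs with
  | nil => intro h cur _ _; simp [pvCodes, pvCEdges]
  | cons p ps ih =>
    intro h cur h0 h4
    have hcase : h = 0 ∨ h = 1 ∨ h = 2 ∨ h = 3 := by omega
    have hR : pvDelta (PySem.Int.mod (h + 1) 4) = ((pvDelta h).2, -(pvDelta h).1) := by
      rcases hcase with rfl | rfl | rfl | rfl <;> decide
    have hL : pvDelta (PySem.Int.mod (h - 1) 4) = (-(pvDelta h).2, (pvDelta h).1) := by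
      rcases hcase with rfl | rfl | rfl | rfl <;> decide
    have hRr : 0 ≤ PySem.Int.mod (h + 1) 4 ∧ PySem.Int.mod (h + 1) 4 < 4 := by
      rcases hcase with rfl | rfl | rfl | rfl <;> decide
    have hLr : 0 ≤ PySem.Int.mod (h - 1) 4 ∧ PySem.Int.mod (h - 1) 4 < 4 := by
      rcases hcase with rfl | rfl | rfl | rfl <;> decide
    by_cases hpR : p = 'R'
    · subst hpR
      simp only [pvCodes, pvCEdges, Char.reduceEq, if_true, if_false]
      rw [ih _ _ hRr.1 hRr.2, hR, List.map_cons, pvCodeOf_canon]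
    · by_cases hpL : p = 'L'
      · subst hpL
        simp only [pvCodes, pvCEdges, Char.reduceEq, if_true, if_false]
        rw [ih _ _ hLr.1 hLr.2, hL, List.map_cons, pvCodeOf_canon]
      · simp only [pvCodes, pvCEdges, if_neg hpR, if_neg hpL]
        rw [ih _ _ h0 h4, List.map_cons, pvCodeOf_canon]

-- ---- B-side stage 2: pvCode is injective on canonical edges with coordinates below m/2
theorem pvDigit (m a a' r r' : Int) (hm : 0 < m) (h1 : -m < r - r') (h2 : r - r' < m)
    (h : a * m + r = a' * m + r') : a = a' ∧ r = r' := by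
  have hz : (a - a') * m = r' - r := by ring_nf; linarith
  have haz : a - a' = 0 := by
    rcases lt_trichotomy (a - a') 0 with hlt | he | hgt
    · nlinarith [mul_le_mul_of_nonneg_right (by omega : a - a' ≤ -1) hm.le]
    · exact he
    · nlinarith [mul_le_mul_of_nonneg_right (by omega : (1 : Int) ≤ a - a') hm.le]
  constructor
  · omega
  · rw [haz, zero_mul] at hz; omega

theorem pvEnc_inj (m x1 y1 x2 y2 x1' y1' x2' y2' : Int) (hm : 0 < m)
    (b1 : -m < 2 * x1 ∧ 2 * x1 < m) (b2 : -m < 2 * y1 ∧ 2 * y1 < m)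
    (b3 : -m < 2 * x2 ∧ 2 * x2 < m) (b4 : -m < 2 * y2 ∧ 2 * y2 < m)
    (b1' : -m < 2 * x1' ∧ 2 * x1' < m) (b2' : -m < 2 * y1' ∧ 2 * y1' < m)
    (b3' : -m < 2 * x2' ∧ 2 * x2' < m) (b4' : -m < 2 * y2' ∧ 2 * y2' < m)
    (h : pvEnc m x1 y1 x2 y2 = pvEnc m x1' y1' x2' y2') :
    x1 = x1' ∧ y1 = y1' ∧ x2 = x2' ∧ y2 = y2' := by
  simp only [pvEnc] at h
  obtain ⟨h3, hy2⟩ := pvDigit m ((x1 * m + y1) * m + x2) ((x1' * m + y1') * m + x2') y2 y2'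
    hm (by omega) (by omega) h
  obtain ⟨h2, hx2⟩ := pvDigit m (x1 * m + y1) (x1' * m + y1') x2 x2'
    hm (by omega) (by omega) h3
  obtain ⟨hx1, hy1⟩ := pvDigit m x1 x1' y1 y1' hm (by omega) (by omega) h2
  exact ⟨hx1, hy1, hx2, hy2⟩

-- the shape every element of the canonical edge list has: lex-ordered, coordinates within ±k
def pvGood (k : Int) (e : (Int × Int) × (Int × Int)) : Prop :=
  (e.1.1 < e.2.1 ∨ (e.1.1 = e.2.1 ∧ e.1.2 ≤ e.2.2))
  ∧ -k ≤ e.1.1 ∧ e.1.1 ≤ k ∧ -k ≤ e.1.2 ∧ e.1.2 ≤ k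
  ∧ -k ≤ e.2.1 ∧ e.2.1 ≤ k ∧ -k ≤ e.2.2 ∧ e.2.2 ≤ k

theorem pvCode_inj (m k : Int) (e f : (Int × Int) × (Int × Int))
    (hm : 2 * k + 1 ≤ m) (hk : 0 ≤ k)
    (he : pvGood k e) (hf : pvGood k f) (h : pvCodeOf m e = pvCodeOf m f) : e = f := by
  obtain ⟨⟨a1, a2⟩, b1, b2⟩ := e
  obtain ⟨⟨c1, c2⟩, d1, d2⟩ := f
  obtain ⟨hle, hbe⟩ := he
  obtain ⟨hlf, hbf⟩ := hf
  simp only at hle hbe hlf hbf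
  have hm0 : 0 < m := by omega
  simp only [pvCodeOf, pvCode] at h
  have key : (pvEnc m a1 a2 b1 b2 = pvEnc m c1 c2 d1 d2
      ∨ pvEnc m a1 a2 b1 b2 = pvEnc m d1 d2 c1 c2)
      ∨ (pvEnc m b1 b2 a1 a2 = pvEnc m c1 c2 d1 d2
      ∨ pvEnc m b1 b2 a1 a2 = pvEnc m d1 d2 c1 c2) := by
    split_ifs at h <;> omega
  rcases key with (h' | h') | (h' | h') <;>
    [ (obtain ⟨e1, e2, e3, e4⟩ := pvEnc_inj m a1 a2 b1 b2 c1 c2 d1 d2 hm0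
        (by omega) (by omega) (by omega) (by omega) (by omega) (by omega) (by omega) (by omega) h');
      (obtain ⟨e1, e2, e3, e4⟩ := pvEnc_inj m a1 a2 b1 b2 d1 d2 c1 c2 hm0
        (by omega) (by omega) (by omega) (by omega) (by omega) (by omega) (by omega) (by omega) h');
      (obtain ⟨e1, e2, e3, e4⟩ := pvEnc_inj m b1 b2 a1 a2 c1 c2 d1 d2 hm0
        (by omega) (by omega) (by omega) (by omega) (by omega) (by omega) (by omega) (by omega) h');
      (obtain ⟨e1, e2, e3, e4⟩ := pvEnc_inj m b1 b2 a1 a2 d1 d2 c1 c2 hm0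
        (by omega) (by omega) (by omega) (by omega) (by omega) (by omega) (by omega) (by omega) h')] <;>
    simp only [Prod.mk.injEq] <;> omega

-- every canonical edge the walk produces is pvGood (k + cs.length) when cur lies within ±k
theorem pvCEdges_good :
    ∀ (cs : List Char) (d cur : Int × Int) (k : Int),
      (d = (0, 1) ∨ d = (1, 0) ∨ d = (0, -1) ∨ d = (-1, 0)) →
      -k ≤ cur.1 → cur.1 ≤ k → -k ≤ cur.2 → cur.2 ≤ k →
      ∀ e ∈ pvCEdges cs d cur, pvGood (k + cs.length) e := by
  intro cs
  induction cs with
  | nil => intro d cur k _ _ _ _ _ e he; simp [pvCEdges] at he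
  | cons p ps ih =>
    intro d cur k hd h1 h2 h3 h4 e he
    set d' := if p = 'R' then (d.2, -d.1) else if p = 'L' then (-d.2, d.1) else d with hd'
    have hd'cases : d' = (0, 1) ∨ d' = (1, 0) ∨ d' = (0, -1) ∨ d' = (-1, 0) := by
      rcases hd with rfl | rfl | rfl | rfl <;> rw [hd'] <;> split_ifs <;> simp
    have hunit : (-1 ≤ d'.1 ∧ d'.1 ≤ 1) ∧ (-1 ≤ d'.2 ∧ d'.2 ≤ 1) := by
      rcases hd'cases with h5 | h5 | h5 | h5 <;> rw [h5] <;> norm_num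
    simp only [pvCEdges, ← hd', List.mem_cons] at he
    rcases he with rfl | he
    · obtain ⟨cx, cy⟩ := cur
      have hlen : (0 : Int) ≤ ps.length := by positivity
      simp only at h1 h2 h3 h4 hunit
      constructor
      · simp only [pvCanon]
        split_ifs with hc
        · simpa using hc
        · simp only [not_or, not_lt, not_and, not_le] at hc
          simp only
          omega
      · simp only [pvCanon, List.length_cons]
        split_ifs <;> simp only <;> push_cast <;> omega
    · have hgood := ih d' (cur.1 + d'.1, cur.2 + d'.2) (k + 1) hd'cases
        (by simp only; omega) (by simp only; omega) (by simp only; omega) (by simp only; omega) e he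
      obtain ⟨hl, hb⟩ := hgood
      refine ⟨hl, ?_⟩
      simp only [List.length_cons] at hb ⊢
      push_cast at hb ⊢
      omega

-- seed edge is good
theorem pvSeedGood (k : Int) (hk : 1 ≤ k) :
    pvGood k (((0 : Int), (0 : Int)), ((0 : Int), (1 : Int))) := by
  refine ⟨by simp, ?_⟩
  simp only
  omega

-- ---- B-side stage 3: the sorted adjacent-neighbour scan decides Nodup
theorem pvAllAdjNe_iff_chain :
    ∀ xs : List Int, pvAllAdjNe xs = true ↔ xs.IsChain (· ≠ ·) := by
  intro xs
  induction xs with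
  | nil => simp [pvAllAdjNe]
  | cons a t ih =>
    cases t with
    | nil => simp [pvAllAdjNe]
    | cons b t' =>
      simp only [pvAllAdjNe, Bool.and_eq_true, bne_iff_ne, List.isChain_cons_cons, ih]

theorem pvChain_and {α : Type} {r s : α → α → Prop} :
    ∀ {l : List α}, l.IsChain r → l.IsChain s → l.IsChain (fun a b => r a b ∧ s a b) := by
  intro l
  induction l with
  | nil => intro _ _; exact List.isChain_nil
  | cons a t ih =>
    cases t with
    | nil => intro _ _; exact List.IsChain.singleton _
    | cons b t' =>
      intro h1 h2
      rw [List.isChain_cons_cons] at h1 h2 ⊢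
      exact ⟨⟨h1.1, h2.1⟩, ih h1.2 h2.2⟩

theorem pvSortedScan (xs : List Int) :
    pvAllAdjNe (PySem.List.sorted xs (fun x => x) false) = true ↔ xs.Nodup := by
  rw [pvAllAdjNe_iff_chain]
  constructor
  · intro h
    have hle : (PySem.List.sorted xs (fun x => x) false).IsChain (· ≤ ·) :=
      (PySem.List.sorted_pairwise xs (fun x => x)).isChain
    have hlt : (PySem.List.sorted xs (fun x => x) false).IsChain (· < ·) := by
      refine (pvChain_and hle h).imp ?_
      intro a b hab; exact lt_of_le_of_ne hab.1 hab.2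
    have : (PySem.List.sorted xs (fun x => x) false).Nodup :=
      (List.isChain_iff_pairwise.mp hlt).imp ne_of_lt
    exact (PySem.List.sorted_perm xs (fun x => x) false).nodup this
  · intro h
    have hnd : (PySem.List.sorted xs (fun x => x) false).Nodup :=
      ((PySem.List.sorted_perm xs (fun x => x) false).symm).nodup h
    exact hnd.isChain

-- ===== VERDICT (by name: the statement is the Claim_ definition above) =====
theorem is_non_coincidental_spec : Claim_equal_is_non_coincidental := by
  intro polyline _
  unfold Spec_is_non_coincidental
  -- A = true ↔ edges.Nodup
  have hA := pvLoopA_eq_nodup polyline.toList (0, 1) (0, 1)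
    (PySem.Set.ofList [(((0 : Int), (0 : Int)), ((0 : Int), (1 : Int)))])
    [(((0 : Int), (0 : Int)), ((0 : Int), (1 : Int)))] (by decide) (by decide) pvSeed
  rw [List.singleton_append] at hA
  set m : Int := 2 * (polyline.toList.length : Int) + 5 with hm
  set edges := (((0 : Int), (0 : Int)), ((0 : Int), (1 : Int)))
    :: pvCEdges polyline.toList ((0 : Int), (1 : Int)) ((0 : Int), (1 : Int)) with hedges
  -- all edges are good
  have hgood : ∀ e ∈ edges, pvGood (1 + (polyline.toList.length : Int)) e := by
    intro e he
    rw [hedges, List.mem_cons] at he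
    rcases he with rfl | he
    · exact pvSeedGood _ (by omega)
    · exact pvCEdges_good polyline.toList (0, 1) (0, 1) 1 (by simp)
        (by norm_num) (by norm_num) (by norm_num) (by norm_num) e he
  -- B's code list is edges mapped through pvCodeOf m
  have hmap : pvCode m 0 0 0 1 :: pvCodes m polyline.toList 0 ((0 : Int), (1 : Int))
      = edges.map (pvCodeOf m) := by
    rw [hedges, List.map_cons, pvCodes_eq_map m polyline.toList 0 (0, 1) (by norm_num) (by norm_num)]
    rfl
  -- the code list has no duplicates iff edges has none
  have hBnodup : (edges.map (pvCodeOf m)).Nodup ↔ edges.Nodup := by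
    constructor
    · exact List.Nodup.of_map (pvCodeOf m)
    · intro h
      refine List.Nodup.map_on ?_ h
      intro x hx y hy hxy
      exact pvCode_inj m (1 + (polyline.toList.length : Int)) x y (by omega) (by omega)
        (hgood x hx) (hgood y hy) hxy
  have hB : is_non_coincidental_alt polyline
      = pvAllAdjNe (PySem.List.sorted (edges.map (pvCodeOf m)) (fun x => x) false) := by
    simp only [is_non_coincidental_alt]
    rw [← hm, hmap]
  rw [hB, Bool.eq_iff_iff]
  unfold is_non_coincidental
  rw [hA, pvSortedScan, hBnodup]
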